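-- pv_equiv track=rewrite | github.com/rklod9545/poker-ai-collab | core/cross_templates.py | neighborhood_3x3
-- ===== SOURCE A (Python) =====
-- from typing import List, Tuple, Any, Dict
--
-- ROWS = 3
--
-- COLS = 7
--
-- def in_bounds(row: int, col: int) -> bool:
--     return 0 <= row < ROWS and 0 <= col < COLS
--
-- def neighborhood_3x3(row: int, col: int) -> List[Tuple[int, int]]:
--     """九宫格邻域（含中心）。边界自动裁剪。"""
--     out = []
--     for dr in (-1, 0, 1):
--         for dc in (-1, 0, 1):
--             nr, nc = row + dr, col + dc
--             if in_bounds(nr, nc):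
--                 out.append((nr, nc))
--     return out
-- ===== SOURCE B (Python) =====
-- ROWS = 3
-- COLS = 7
--
-- def neighborhood_3x3(row, col):
--     return [(nr, nc)
--             for nr in range(max(0, row - 1), min(ROWS, row + 2))
--             for nc in range(max(0, col - 1), min(COLS, col + 2))]
-- ===== Notes on version B (the rewrite author's own statement) =====
-- stated objective: simpler
-- what changed: B computes the clipped row/col windows arithmetically up front and traverses only valid cells, replacing A's nine-offset loop with an in_bounds test per cell.
import Mathlib
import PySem

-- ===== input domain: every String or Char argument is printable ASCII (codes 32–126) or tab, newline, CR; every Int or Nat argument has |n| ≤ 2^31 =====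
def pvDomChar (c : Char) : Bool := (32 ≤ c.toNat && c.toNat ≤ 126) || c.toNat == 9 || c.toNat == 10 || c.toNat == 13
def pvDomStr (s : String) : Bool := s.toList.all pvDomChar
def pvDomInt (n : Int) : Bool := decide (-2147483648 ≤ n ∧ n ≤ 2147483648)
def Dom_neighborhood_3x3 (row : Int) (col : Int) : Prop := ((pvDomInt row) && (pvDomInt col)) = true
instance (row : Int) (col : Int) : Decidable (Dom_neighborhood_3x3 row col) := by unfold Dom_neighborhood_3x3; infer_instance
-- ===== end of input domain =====

-- ===== PORT A =====
-- clipped 3x3 neighborhood; B derives the valid window arithmetically instead of filtering nine offsets with in_bounds (objective: simpler)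
def pvROWS : Int := 3
def pvCOLS : Int := 7
def in_bounds (row : Int) (col : Int) : Bool := (0 ≤ row && row < pvROWS) && (0 ≤ col && col < pvCOLS)
def neighborhood_3x3 (row : Int) (col : Int) : List (Int × Int) :=
  [-1, 0, 1].foldl (fun out dr =>
    [-1, 0, 1].foldl (fun out dc =>
      let nr := row + dr
      let nc := col + dc
      if in_bounds nr nc then out ++ [(nr, nc)] else out) out) []

-- ===== PORT B =====
def neighborhood_3x3_alt (row : Int) (col : Int) : List (Int × Int) :=
  (PySem.List.pyRange (max 0 (row - 1)) (min pvROWS (row + 2)) 1).flatMap (fun nr =>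
    (PySem.List.pyRange (max 0 (col - 1)) (min pvCOLS (col + 2)) 1).map (fun nc => (nr, nc)))

-- ===== PRECONDITION & SPEC =====
def Spec_neighborhood_3x3 (row : Int) (col : Int) (out : List (Int × Int)) : Prop := out = neighborhood_3x3_alt row col
instance (row : Int) (col : Int) (out : List (Int × Int)) : Decidable (Spec_neighborhood_3x3 row col out) := by unfold Spec_neighborhood_3x3; infer_instance

-- ===== CLAIM (what is proved, stated in full; the proofs are below) =====
def Claim_equal_neighborhood_3x3 : Prop := ∀ (row : Int) (col : Int), Dom_neighborhood_3x3 row col → Spec_neighborhood_3x3 row col (neighborhood_3x3 row col)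

-- ===== LEMMAS AND PROOFS =====

lemma inb_false (row col dr dc : Int)
    (h : row < -1 ∨ 3 < row ∨ col < -1 ∨ 7 < col)
    (hdr : -1 ≤ dr ∧ dr ≤ 1) (hdc : -1 ≤ dc ∧ dc ≤ 1) :
    in_bounds (row + dr) (col + dc) = false := by
  simp only [in_bounds, pvROWS, pvCOLS, Bool.and_eq_false_iff, decide_eq_false_iff_not, not_lt, not_le]
  omega

lemma pyRange_one_empty (a b : Int) (h : b ≤ a) : PySem.List.pyRange a b 1 = [] := by
  rw [PySem.List.pyRange_one]
  have : (b - a).toNat = 0 := by omega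
  simp [this]

lemma both_empty (row col : Int)
    (h : row < -1 ∨ 3 < row ∨ col < -1 ∨ 7 < col) :
    neighborhood_3x3 row col = [] ∧ neighborhood_3x3_alt row col = [] := by
  constructor
  · simp only [neighborhood_3x3, List.foldl,
      inb_false row col (-1) (-1) h (by norm_num) (by norm_num),
      inb_false row col (-1) (0) h (by norm_num) (by norm_num),
      inb_false row col (-1) (1) h (by norm_num) (by norm_num),
      inb_false row col (0) (-1) h (by norm_num) (by norm_num),
      inb_false row col (0) (0) h (by norm_num) (by norm_num),
      inb_false row col (0) (1) h (by norm_num) (by norm_num),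
      inb_false row col (1) (-1) h (by norm_num) (by norm_num),
      inb_false row col (1) (0) h (by norm_num) (by norm_num),
      inb_false row col (1) (1) h (by norm_num) (by norm_num),
      Bool.false_eq_true, if_false]
  · simp only [neighborhood_3x3_alt, pvROWS, pvCOLS]
    rcases h with h | h | h | h
    · have hr : PySem.List.pyRange (max 0 (row - 1)) (min 3 (row + 2)) 1 = [] :=
        pyRange_one_empty _ _ (by omega)
      simp [hr]
    · have hr : PySem.List.pyRange (max 0 (row - 1)) (min 3 (row + 2)) 1 = [] :=
        pyRange_one_empty _ _ (by omega)
      simp [hr]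
    all_goals
      have hc : PySem.List.pyRange (max 0 (col - 1)) (min 7 (col + 2)) 1 = [] :=
        pyRange_one_empty _ _ (by omega)
      simp [hc]

-- ===== VERDICT (by name: the statement is the Claim_ definition above) =====
theorem neighborhood_3x3_spec : Claim_equal_neighborhood_3x3 := by
  intro row col _
  unfold Spec_neighborhood_3x3
  by_cases hr : -1 ≤ row ∧ row ≤ 3 ∧ -1 ≤ col ∧ col ≤ 7
  · obtain ⟨h1, h2, h3, h4⟩ := hr
    interval_cases row <;> interval_cases col <;> decide
  · have h : row < -1 ∨ 3 < row ∨ col < -1 ∨ 7 < col := by omega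
    have := both_empty row col h
    rw [this.1, this.2]
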